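-- pv_equiv track=rewrite | github.com/seong-wooo/Algorithm_Study | 프로그래머스/1/92334. 신고 결과 받기/신고 결과 받기.py | solution
-- ===== SOURCE A (Python) =====
-- from collections import defaultdict
--
-- def solution(id_list, report, k):
--
--     d_id = defaultdict(set)
--     d_report = defaultdict(int)
--
--     for re in report:
--         a, b = re.split()
--         if b not in d_id[a]:
--             d_id[a].add(b)
--             d_report[b] += 1
--
--     answer = [0] * len(id_list)
--     for i in range(len(id_list)):
--         for j in d_id[id_list[i]]:
--             if d_report[j] >= k:
--                 answer[i] += 1
--
--     return answer
-- ===== SOURCE B (Python) =====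
-- from collections import Counter
--
-- def solution(id_list, report, k):
--     pairs = []
--     for r in report:
--         a, b = r.split()
--         pairs.append((a, b))
--     uniq = list(dict.fromkeys(pairs))
--     cnt = Counter(b for _, b in uniq)
--     return [sum(1 for a, b in uniq if a == name and cnt[b] >= k) for name in id_list]
-- ===== Notes on version B (the rewrite author's own statement) =====
-- stated objective: alternative
-- what changed: Replaces A's incremental dict-of-sets plus count-dict bookkeeping by building a flat deduplicated (reporter, reported) pair list once (dict.fromkeys), taking a Counter of reported names over it, and scanning that list per id to count pairs whose reported user reached k reports.
import Mathlib
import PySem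

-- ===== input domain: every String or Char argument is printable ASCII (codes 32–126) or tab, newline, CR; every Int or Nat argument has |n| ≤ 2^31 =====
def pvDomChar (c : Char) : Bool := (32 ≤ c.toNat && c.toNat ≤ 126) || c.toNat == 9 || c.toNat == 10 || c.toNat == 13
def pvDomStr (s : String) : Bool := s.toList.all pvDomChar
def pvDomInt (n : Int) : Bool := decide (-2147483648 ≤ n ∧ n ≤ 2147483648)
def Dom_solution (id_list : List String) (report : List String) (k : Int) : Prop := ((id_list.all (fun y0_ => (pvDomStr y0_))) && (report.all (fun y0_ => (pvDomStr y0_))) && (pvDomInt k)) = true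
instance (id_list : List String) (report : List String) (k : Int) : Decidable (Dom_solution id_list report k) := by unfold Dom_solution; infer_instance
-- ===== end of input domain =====

-- B replaces A's dict-of-sets + counter incremental bookkeeping by a flat deduplicated
-- (reporter, reported) pair list scanned per id (alternative decomposition, not faster).

-- ===== PORT A =====
-- one iteration of A's report loop, applied to an already-unpacked pair (a, b)
def aPair (st : PySem.Dict String (PySem.Set String) × PySem.Dict String Int)
    (p : String × String) :
    PySem.Dict String (PySem.Set String) × PySem.Dict String Int :=
  let s := st.1.getD p.1 []
  if PySem.Set.contains s p.2 then st
  else (st.1.insert p.1 (PySem.Set.add s p.2), st.2.insert p.2 (st.2.getD p.2 0 + 1))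

def solution (id_list : List String) (report : List String) (k : Int) : List Int :=
  let st := report.foldl
    (fun st re =>
      match PySem.Str.split₀ re with
      | [a, b] => aPair st (a, b)
      | _ => st)
    (PySem.Dict.empty, PySem.Dict.empty)
  id_list.map (fun name =>
    (st.1.getD name []).foldl (fun acc j => if st.2.getD j 0 ≥ k then acc + 1 else acc) 0)

-- ===== PORT B =====
-- one iteration of B's parsing loop: append the (a, b) pair of one report line
-- `a, b = r.split()` succeeds exactly when the split has length 2; then a, b are its two words
def bPair (acc : List (String × String)) (r : String) : List (String × String) :=
  let ws := PySem.Str.split₀ r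
  if h : ws.length = 2 then acc ++ [(ws[0], ws[1])] else acc

def solution_alt (id_list : List String) (report : List String) (k : Int) : List Int :=
  let pairs := report.foldl bPair []
  let uniq := PySem.List.dedup pairs
  let cnt := PySem.Dict.counter (uniq.map Prod.snd)
  id_list.map (fun name =>
    uniq.foldl (fun s p => if p.1 = name ∧ cnt.getD p.2 0 ≥ k then s + 1 else s) 0)

-- ===== PRECONDITION & SPEC =====
-- Pre_ excludes only the inputs where some report does not split into exactly two
-- whitespace-separated words: there Python's `a, b = re.split()` raises ValueError in both A and B.
def Pre_solution (id_list : List String) (report : List String) (k : Int) : Prop :=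
  ∀ r ∈ report, (PySem.Str.split₀ r).length = 2
instance (id_list : List String) (report : List String) (k : Int) : Decidable (Pre_solution id_list report k) := by unfold Pre_solution; infer_instance

def pvWitness_solution : List String × List String × Int :=
  (["muzi", "frodo", "apeach"], ["muzi frodo", "apeach frodo", "muzi frodo"], 2)

def Spec_solution (id_list : List String) (report : List String) (k : Int) (out : List Int) : Prop := out = solution_alt id_list report k
instance (id_list : List String) (report : List String) (k : Int) (out : List Int) : Decidable (Spec_solution id_list report k out) := by unfold Spec_solution; infer_instance

-- ===== CLAIM (what is proved, stated in full; the proofs are below) =====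
def Claim_equal_solution : Prop := ∀ (id_list : List String) (report : List String) (k : Int), Dom_solution id_list report k → Pre_solution id_list report k → Spec_solution id_list report k (solution id_list report k)

-- ===== LEMMAS AND PROOFS =====

-- the (reporter, reported) pair a report line contributes (empty when it does not split in two)
def pvPair (r : String) : List (String × String) :=
  match PySem.Str.split₀ r with
  | [a, b] => [(a, b)]
  | _ => []

theorem pvFoldA_eq (report : List String)
    (st : PySem.Dict String (PySem.Set String) × PySem.Dict String Int) :
    report.foldl
      (fun st re =>
        match PySem.Str.split₀ re with
        | [a, b] => aPair st (a, b)
        | _ => st) st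
    = (report.flatMap pvPair).foldl aPair st := by
  induction report generalizing st with
  | nil => rfl
  | cons r t ih =>
    simp only [List.foldl_cons, List.flatMap_cons, List.foldl_append, ih]
    rcases h : PySem.Str.split₀ r with _ | ⟨a, _ | ⟨b, _ | _⟩⟩ <;> simp [pvPair, h]

theorem pvPairsB_eq (report : List String) :
    report.foldl bPair ([] : List (String × String)) = report.flatMap pvPair := by
  have h : bPair = fun (acc : List (String × String)) r => acc ++ pvPair r := by
    funext acc r
    rcases h : PySem.Str.split₀ r with _ | ⟨a, _ | ⟨b, _ | _⟩⟩ <;>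
      simp [bPair, pvPair, h]
  rw [h, PySem.List.foldl_append_eq_flatMap, List.nil_append]

theorem pvMem_of_snd_filter (u : List (String × String)) (p : String × String) :
    p.2 ∈ (u.filter (fun q => q.1 == p.1)).map Prod.snd ↔ p ∈ u := by
  constructor
  · rintro h
    simp only [List.mem_map, List.mem_filter, beq_iff_eq] at h
    obtain ⟨q, ⟨hq, h1⟩, h2⟩ := h
    have : q = p := Prod.ext h1 h2
    exact this ▸ hq
  · intro h
    exact List.mem_map.mpr ⟨p, List.mem_filter.mpr ⟨h, by simp⟩, rfl⟩

-- the loop invariant: A's two dicts, after processing a pair list, are the per-reporter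
-- slices and the per-reported distinct counts of the deduplicated pair list
theorem pvInv (ps : List (String × String)) :
    (∀ a, ((ps.foldl aPair (PySem.Dict.empty, PySem.Dict.empty)).1.getD a []) =
      ((PySem.Set.ofList ps).filter (fun p => p.1 == a)).map Prod.snd)
  ∧ (∀ b, ((ps.foldl aPair (PySem.Dict.empty, PySem.Dict.empty)).2.getD b 0) =
      (((PySem.Set.ofList ps).map Prod.snd).count b : Int)) := by
  induction ps using List.reverseRecOn with
  | nil =>
    refine ⟨fun a => ?_, fun b => ?_⟩ <;>
      simp [PySem.Set.ofList_eq_foldl, PySem.Dict.getD_empty]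
  | append_singleton t p ih =>
    obtain ⟨H1, H2⟩ := ih
    have hof : PySem.Set.ofList (t ++ [p]) = PySem.Set.add (PySem.Set.ofList t) p := by
      simp [PySem.Set.ofList_eq_foldl, List.foldl_append, PySem.Set.add]
    rw [List.foldl_append]
    set st := t.foldl aPair (PySem.Dict.empty, PySem.Dict.empty) with hst
    set u := PySem.Set.ofList t with hu
    have hguard : PySem.Set.contains (st.1.getD p.1 []) p.2 = PySem.Set.contains u p := by
      by_cases hm : p ∈ u
      · have h1 : PySem.Set.contains (st.1.getD p.1 []) p.2 = true := by
          rw [H1]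
          simp only [PySem.Set.contains, List.contains_iff_mem]
          exact (pvMem_of_snd_filter u p).mpr hm
        have h2 : PySem.Set.contains u p = true := by
          simp only [PySem.Set.contains, List.contains_iff_mem]; exact hm
        rw [h1, h2]
      · have h1 : PySem.Set.contains (st.1.getD p.1 []) p.2 = false := by
          rw [H1]
          simp only [PySem.Set.contains]
          simpa using fun h => hm ((pvMem_of_snd_filter u p).mp h)
        have h2 : PySem.Set.contains u p = false := by
          simp only [PySem.Set.contains]
          simpa using hm
        rw [h1, h2]
    by_cases hm : p ∈ u
    · have hc : PySem.Set.contains u p = true := by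
        simpa [PySem.Set.contains] using hm
      have hadd : PySem.Set.add u p = u := by simp only [PySem.Set.add, hc]; exact if_pos trivial
      simp only [List.foldl_cons, List.foldl_nil, aPair, hguard, hc, hof, hadd]
      rw [if_pos trivial]
      exact ⟨H1, H2⟩
    · have hc : PySem.Set.contains u p = false := by
        simp only [PySem.Set.contains, List.contains_iff_mem]
        simpa using hm
      have hadd : PySem.Set.add u p = u ++ [p] := by simp only [PySem.Set.add, hc]; exact if_neg Bool.false_ne_true
      have hnotin : p.2 ∉ (u.filter (fun q => q.1 == p.1)).map Prod.snd :=
        fun h => hm ((pvMem_of_snd_filter u p).mp h)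
      simp only [List.foldl_cons, List.foldl_nil, aPair, hguard, hc, hof, hadd]
      rw [if_neg Bool.false_ne_true]
      constructor
      · intro a
        by_cases ha : a = p.1
        · subst ha
          rw [PySem.Dict.getD_insert_self]
          have hcs : PySem.Set.contains (st.1.getD p.1 []) p.2 = false := by
            rw [H1 p.1]
            simp only [PySem.Set.contains]
            simpa using hnotin
          have hadd2 : PySem.Set.add (st.1.getD p.1 []) p.2 = st.1.getD p.1 [] ++ [p.2] := by
            simp only [PySem.Set.add, hcs]; exact if_neg Bool.false_ne_true
          rw [hadd2, H1 p.1, List.filter_append, List.map_append]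
          simp
        · rw [PySem.Dict.getD_insert_of_ne _ _ _ ha, H1 a, List.filter_append]
          have : (p.1 == a) = false := by simp [Ne.symm ha]
          simp [this]
      · intro b
        by_cases hb : b = p.2
        · subst hb
          rw [PySem.Dict.getD_insert_self, H2 p.2, List.map_append, List.count_append]
          push_cast
          simp
        · rw [PySem.Dict.getD_insert_of_ne _ _ _ hb, H2 b, List.map_append, List.count_append]
          simp [Ne.symm, hb]

-- ===== VERDICT (by name: the statement is the Claim_ definition above) =====
theorem solution_spec : Claim_equal_solution := by
  intro id_list report k _ _
  unfold Spec_solution solution solution_alt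
  simp only [pvFoldA_eq, pvPairsB_eq, PySem.List.dedup_eq_ofList]
  set ps := report.flatMap pvPair
  obtain ⟨H1, H2⟩ := pvInv ps
  set st := ps.foldl aPair (PySem.Dict.empty, PySem.Dict.empty)
  set u := PySem.Set.ofList ps
  apply List.map_congr_left
  intro name _
  rw [H1 name]
  rw [PySem.List.foldl_ite_add_one (fun j => st.2.getD j 0 ≥ k),
      PySem.List.foldl_ite_add_one (fun p : String × String => p.1 = name ∧ (PySem.Dict.counter (u.map Prod.snd)).getD p.2 0 ≥ k)]
  congr 1
  rw [List.countP_map, List.countP_filter]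
  congr 1
  refine List.countP_congr (fun p _ => ?_)
  by_cases h1 : p.1 = name <;>
    simp [h1, Function.comp, H2, PySem.Dict.getD_counter]
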